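-- pv_equiv track=rewrite | github.com/IMULMUL/fuzzingbook | utils/post-html.py | bibtex_unescape
-- ===== SOURCE A (Python) =====
-- def bibtex_unescape(contents):
--     """Fix TeX escapes introduced by BibTeX"""
--     tex_unescape_table = {
--         r'{\"a}': "ä",
--         r'{\"o}': "ö",
--         r'{\"u}': "ü",
--         r'{\"i}': "ï",
--         r'{\"e}': "ë",
--         r'{\"A}': "Ä",
--         r'{\"O}': "Ö",
--         r'{\"U}': "Ü",
--         r'{\ss}': "ß",
--         r'{\`e}': "è",
--         r'{\'e}': "é",
--         r'{\`a}': "à",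
--         r'{\'a}': "á",
--         r'{\d{s}}': "ṣ",
--         r'{\d{n}}': "ṇ",
--         r'{\d{t}}': "ṭ",
--         r'{\=a}': "ā",
--         r'{\=i}': "ī"
--     }
--     for key in tex_unescape_table:
--         contents = contents.replace(key, tex_unescape_table[key])
--     return contents
-- ===== SOURCE B (Python) =====
-- _TEX_UNESCAPE_TABLE = [
--     (r'{\"a}', "ä"), (r'{\"o}', "ö"), (r'{\"u}', "ü"), (r'{\"i}', "ï"),
--     (r'{\"e}', "ë"), (r'{\"A}', "Ä"), (r'{\"O}', "Ö"), (r'{\"U}', "Ü"),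
--     (r'{\ss}', "ß"), (r'{\`e}', "è"), (r"{\'e}", "é"), (r'{\`a}', "à"),
--     (r"{\'a}", "á"), (r'{\d{s}}', "ṣ"), (r'{\d{n}}', "ṇ"), (r'{\d{t}}', "ṭ"),
--     (r'{\=a}', "ā"), (r'{\=i}', "ī"),
-- ]
--
-- def bibtex_unescape(contents):
--     """Fix TeX escapes introduced by BibTeX"""
--     out = []
--     i = 0
--     n = len(contents)
--     while i < n:
--         for key, val in _TEX_UNESCAPE_TABLE:
--             if contents.startswith(key, i):
--                 out.append(val)
--                 i += len(key)
--                 break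
--         else:
--             out.append(contents[i])
--             i += 1
--     return ''.join(out)
-- ===== Notes on version B (the rewrite author's own statement) =====
-- stated objective: alternative
-- what changed: Replaced 18 sequential full-string str.replace passes by a single left-to-right scan that, at each position, matches any table key (in table order) and emits its replacement, building the output once.
import Mathlib
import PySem

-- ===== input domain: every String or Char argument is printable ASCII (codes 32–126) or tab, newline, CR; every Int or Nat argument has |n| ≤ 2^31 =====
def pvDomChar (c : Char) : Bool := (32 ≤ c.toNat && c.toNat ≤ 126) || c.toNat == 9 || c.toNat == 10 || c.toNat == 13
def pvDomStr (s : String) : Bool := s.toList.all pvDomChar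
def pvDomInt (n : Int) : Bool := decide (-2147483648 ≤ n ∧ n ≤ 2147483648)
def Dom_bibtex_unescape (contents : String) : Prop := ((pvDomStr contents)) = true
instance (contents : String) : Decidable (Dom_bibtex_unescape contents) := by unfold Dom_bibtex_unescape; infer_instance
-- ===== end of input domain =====

-- B replaces A's 18 sequential full-string str.replace passes by one left-to-right scan that
-- matches any table key at each position and emits its replacement (alternative algorithm, same result).

-- ===== PORT A =====
-- the Python dict, as an association list in insertion order
def aTable : List (String × String) :=
  [("{\\\"a}", "ä"),
   ("{\\\"o}", "ö"),
   ("{\\\"u}", "ü"),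
   ("{\\\"i}", "ï"),
   ("{\\\"e}", "ë"),
   ("{\\\"A}", "Ä"),
   ("{\\\"O}", "Ö"),
   ("{\\\"U}", "Ü"),
   ("{\\ss}", "ß"),
   ("{\\`e}", "è"),
   ("{\\'e}", "é"),
   ("{\\`a}", "à"),
   ("{\\'a}", "á"),
   ("{\\d{s}}", "ṣ"),
   ("{\\d{n}}", "ṇ"),
   ("{\\d{t}}", "ṭ"),
   ("{\\=a}", "ā"),
   ("{\\=i}", "ī")]

-- for key in table: contents = contents.replace(key, table[key])
def bibtex_unescape (contents : String) : String :=
  aTable.foldl (fun c kv => PySem.Str.replace c kv.1 kv.2) contents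

-- ===== PORT B =====
-- B's table (same pairs), held as char lists for the scan
def bTable : List (List Char × List Char) :=
  [("{\\\"a}", "ä"),
   ("{\\\"o}", "ö"),
   ("{\\\"u}", "ü"),
   ("{\\\"i}", "ï"),
   ("{\\\"e}", "ë"),
   ("{\\\"A}", "Ä"),
   ("{\\\"O}", "Ö"),
   ("{\\\"U}", "Ü"),
   ("{\\ss}", "ß"),
   ("{\\`e}", "è"),
   ("{\\'e}", "é"),
   ("{\\`a}", "à"),
   ("{\\'a}", "á"),
   ("{\\d{s}}", "ṣ"),
   ("{\\d{n}}", "ṇ"),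
   ("{\\d{t}}", "ṭ"),
   ("{\\=a}", "ā"),
   ("{\\=i}", "ī")].map (fun kv => (kv.1.toList, kv.2.toList))

-- first key of the table that matches at the head of s (B's inner for/startswith loop);
-- returns the rest of s after the key, and the replacement
def tryMatch : List (List Char × List Char) → List Char → Option (List Char × List Char)
  | [], _ => none
  | (k, v) :: rest, s => if k.isPrefixOf s then some (s.drop k.length, v) else tryMatch rest s

theorem tryMatch_some_lt : ∀ (ts : List (List Char × List Char)) (s u v : List Char),
    (∀ e ∈ ts, e.1 ≠ []) → tryMatch ts s = some (u, v) → u.length < s.length := by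
  intro ts
  induction ts with
  | nil => intro s u v _ h; simp [tryMatch] at h
  | cons e rest ih =>
    intro s u v hne h
    obtain ⟨k, v'⟩ := e
    simp only [tryMatch] at h
    split at h
    · rename_i hpre
      have hk : k ≠ [] := (hne (k, v') (by simp))
      have hkl : 1 ≤ k.length := List.length_pos_of_ne_nil hk
      have hsl : k.length ≤ s.length := (List.isPrefixOf_iff_prefix.mp hpre).length_le
      have : u = s.drop k.length := by injection h with h'; injection h' with h1 h2; exact h1.symm
      subst this
      simp only [List.length_drop]
      omega
    · exact ih s u v (fun e he => hne e (by simp [he])) h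

-- B: one pass over the string, emitting either a replacement or the current char
def scanGo (s : List Char) : List Char :=
  match s with
  | [] => []
  | c :: t =>
    match h : tryMatch bTable (c :: t) with
    | some (u, v) => v ++ scanGo u
    | none => c :: scanGo t
termination_by s.length
decreasing_by
  · exact tryMatch_some_lt bTable (c :: t) u v (by decide) h
  · simp

def bibtex_unescape_alt (contents : String) : String :=
  String.ofList (scanGo contents.toList)

-- ===== PRECONDITION & SPEC =====
def Spec_bibtex_unescape (contents : String) (out : String) : Prop := out = bibtex_unescape_alt contents
instance (contents : String) (out : String) : Decidable (Spec_bibtex_unescape contents out) := by unfold Spec_bibtex_unescape; infer_instance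

-- ===== CLAIM (what is proved, stated in full; the proofs are below) =====
def Claim_equal_bibtex_unescape : Prop := ∀ (contents : String), Dom_bibtex_unescape contents → Spec_bibtex_unescape contents (bibtex_unescape contents)

-- ===== LEMMAS AND PROOFS =====

-- plain (accumulator-free) form of Python str.replace for a nonempty pattern
def rep1 (old nw : List Char) (s : List Char) : List Char :=
  match s with
  | [] => []
  | c :: t =>
    if h : old ≠ [] ∧ old.isPrefixOf (c :: t) then nw ++ rep1 old nw ((c :: t).drop old.length)
    else c :: rep1 old nw t
termination_by s.length
decreasing_by
  · have h1 : 1 ≤ old.length := List.length_pos_of_ne_nil h.1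
    simp only [List.length_drop, List.length_cons]
    omega
  · simp

theorem rep1_nil (old nw : List Char) : rep1 old nw [] = [] := by
  rw [rep1.eq_def]

theorem rep1_cons_neg (old nw : List Char) (c : Char) (t : List Char)
    (h : ¬ old <+: c :: t) : rep1 old nw (c :: t) = c :: rep1 old nw t := by
  conv_lhs => rw [rep1.eq_def]
  dsimp only
  rw [dif_neg]
  intro ⟨_, hp⟩
  exact h (List.isPrefixOf_iff_prefix.mp hp)

theorem rep1_cons_pos (old nw : List Char) (c : Char) (t : List Char)
    (hne : old ≠ []) (h : old <+: c :: t) :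
    rep1 old nw (c :: t) = nw ++ rep1 old nw ((c :: t).drop old.length) := by
  conv_lhs => rw [rep1.eq_def]
  dsimp only
  rw [dif_pos ⟨hne, List.isPrefixOf_iff_prefix.mpr h⟩]

theorem rep1_match (old nw s : List Char) (hne : old ≠ []) (h : old <+: s) :
    rep1 old nw s = nw ++ rep1 old nw (s.drop old.length) := by
  match s with
  | [] =>
    exact absurd (List.prefix_nil.mp h) hne
  | c :: t => exact rep1_cons_pos old nw c t hne h

-- PySem's replace agrees with rep1 for a nonempty pattern
theorem replaceGo_eq_rep1 : ∀ (fuel : Nat) (old nw l acc : List Char), old ≠ [] →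
    l.length ≤ fuel → PySem.Chars.replace.go old nw fuel l acc = acc.reverse ++ rep1 old nw l := by
  intro fuel
  induction fuel with
  | zero =>
    intro old nw l acc hne hl
    have : l = [] := List.eq_nil_of_length_eq_zero (Nat.le_zero.mp hl)
    subst this
    simp [PySem.Chars.replace.go, rep1_nil]
  | succ fuel ih =>
    intro old nw l acc hne hl
    match l with
    | [] => simp [PySem.Chars.replace.go, rep1_nil]
    | c :: t =>
      simp only [PySem.Chars.replace.go]
      by_cases hp : old.isPrefixOf (c :: t)
      · rw [if_pos hp]
        have hpre := List.isPrefixOf_iff_prefix.mp hp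
        have h1 : 1 ≤ old.length := List.length_pos_of_ne_nil hne
        have hdl : ((c :: t).drop old.length).length ≤ fuel := by
          simp only [List.length_drop, List.length_cons]
          simp only [List.length_cons] at hl
          omega
        rw [ih old nw _ _ hne hdl, rep1_cons_pos old nw c t hne hpre]
        simp
      · rw [if_neg hp]
        have hdl : t.length ≤ fuel := by simp only [List.length_cons] at hl; omega
        rw [ih old nw t (c :: acc) hne hdl,
          rep1_cons_neg old nw c t (fun hx => hp (List.isPrefixOf_iff_prefix.mpr hx))]
        simp

theorem chars_replace_eq_rep1 (s old nw : List Char) (hne : old ≠ []) :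
    PySem.Chars.replace s old nw = rep1 old nw s := by
  unfold PySem.Chars.replace
  rw [if_neg (by simp [List.isEmpty_iff, hne])]
  rw [replaceGo_eq_rep1 s.length old nw s [] hne le_rfl]
  simp

-- A's fold, on the char-list side
def foldlRep (ts : List (List Char × List Char)) (s : List Char) : List Char :=
  ts.foldl (fun c kv => rep1 kv.1 kv.2 c) s

theorem A_toList : ∀ (ts : List (String × String)) (s : String), (∀ e ∈ ts, e.1 ≠ "") →
    (ts.foldl (fun c kv => PySem.Str.replace c kv.1 kv.2) s).toList
      = foldlRep (ts.map fun kv => (kv.1.toList, kv.2.toList)) s.toList := by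
  intro ts
  induction ts with
  | nil => intro s _; simp [foldlRep]
  | cons e rest ih =>
    intro s hne
    simp only [List.foldl_cons, List.map_cons, foldlRep] at *
    rw [ih (PySem.Str.replace s e.1 e.2) (fun x hx => hne x (by simp [hx]))]
    congr 1
    rw [PySem.Str.toList_replace, chars_replace_eq_rep1]
    intro h
    exact hne e (by simp) (String.toList_inj.mp (by rw [h]; rfl))

theorem foldlRep_nil : ∀ ts, foldlRep ts [] = [] := by
  intro ts
  induction ts with
  | nil => rfl
  | cons e rest ih => simpa [foldlRep, rep1_nil] using ih

-- take of rep1: either untouched, or it already contains a replacement character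
theorem rep1_take (old nw : List Char) (hne : old ≠ []) (hnw : nw ≠ []) :
    ∀ s m, (rep1 old nw s).take m = s.take m ∨ ∃ c ∈ nw, c ∈ (rep1 old nw s).take m := by
  intro s
  induction s using rep1.induct old with
  | case1 => intro m; left; simp [rep1_nil]
  | case2 c t h ih =>
    intro m
    rw [rep1_cons_pos old nw c t h.1 (List.isPrefixOf_iff_prefix.mp h.2)]
    match m with
    | 0 => left; simp
    | m + 1 =>
      right
      match nw, hnw with
      | d :: nw', _ =>
        exact ⟨d, by simp, by simp⟩
  | case3 c t h ih =>
    intro m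
    have hnp : ¬ old <+: c :: t := by
      intro hx
      exact h ⟨hne, List.isPrefixOf_iff_prefix.mpr hx⟩
    rw [rep1_cons_neg old nw c t hnp]
    match m with
    | 0 => left; simp
    | m + 1 =>
      rcases ih m with h1 | ⟨d, hd, hdm⟩
      · left; simp [h1]
      · right; exact ⟨d, hd, by simp [hdm]⟩

theorem prefix_rep1 (old nw s k' : List Char) (hne : old ≠ []) (hnw : nw ≠ [])
    (hfresh : ∀ c ∈ nw, c ∉ k') (h : k' <+: rep1 old nw s) : k' <+: s := by
  rcases rep1_take old nw hne hnw s k'.length with heq | ⟨c, hc, hcm⟩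
  · rw [List.prefix_iff_eq_take] at h
    exact List.prefix_iff_eq_take.mpr (h.trans heq)
  · exfalso
    apply hfresh c hc
    rw [List.prefix_iff_eq_take] at h
    rw [← h] at hcm
    exact hcm

-- a nonempty pattern whose characters avoid v cannot match at the head of v ++ w
theorem no_prefix_fresh (a v w : List Char) (ha : a ≠ []) (hv : v ≠ [])
    (hfresh : ∀ c ∈ v, c ∉ a) : ¬ a <+: v ++ w := by
  match a, v with
  | c :: a', d :: v' =>
    intro h
    rw [List.cons_append, List.cons_prefix_cons] at h
    exact hfresh d (by simp) (by simp [h.1])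

theorem rep1_append (old nw a u : List Char)
    (h : ∀ p, p < a.length → ¬ old <+: (a ++ u).drop p) :
    rep1 old nw (a ++ u) = a ++ rep1 old nw u := by
  induction a generalizing u with
  | nil => simp
  | cons c a' ih =>
    rw [List.cons_append, rep1_cons_neg old nw c (a' ++ u) (by simpa using h 0 (by simp))]
    rw [ih u (fun p hp => by simpa using h (p + 1) (by simp; omega))]
    simp

-- === concrete facts about the table (checked by kernel computation) ===

theorem tb_ne : ∀ e ∈ bTable, e.1 ≠ [] ∧ e.2 ≠ [] := by decide

theorem tb_nodup : bTable.Nodup := by decide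

theorem tb_nopre : ∀ e1 ∈ bTable, ∀ e2 ∈ bTable, e1 ≠ e2 → ¬ e1.1 <+: e2.1 := by decide

theorem tb_noov : ∀ e1 ∈ bTable, ∀ e2 ∈ bTable, ∀ p < e1.1.length, 0 < p →
    ¬ (e1.1.drop p <+: e2.1) ∧ ¬ (e2.1 <+: e1.1.drop p) := by decide

theorem tb_fresh : ∀ e1 ∈ bTable, ∀ e2 ∈ bTable, ∀ c ∈ e2.2, c ∉ e1.1 := by
  have hb : (bTable.all fun e1 => bTable.all fun e2 => e2.2.all fun c => !(e1.1.contains c)) = true := by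
    decide
  simp only [List.all_eq_true] at hb
  intro e1 h1 e2 h2 c hc
  have h := hb e1 h1 e2 h2 c hc
  simpa using h

-- a key different from e.1 cannot match anywhere inside the e.1-prefix of e.1 ++ u
theorem key_no_match (e e' : List Char × List Char) (he : e ∈ bTable) (he' : e' ∈ bTable)
    (hne : e' ≠ e) (u : List Char) :
    ∀ p, p < e.1.length → ¬ e'.1 <+: (e.1 ++ u).drop p := by
  intro p hp hpre
  rcases Nat.eq_zero_or_pos p with rfl | hpos
  · simp only [List.drop_zero] at hpre
    rcases List.prefix_or_prefix_of_prefix hpre (List.prefix_append e.1 u) with h | h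
    · exact tb_nopre e' he' e he hne h
    · exact tb_nopre e he e' he' (fun hx => hne hx.symm) h
  · rw [List.drop_append, Nat.sub_eq_zero_of_le (Nat.le_of_lt hp), List.drop_zero] at hpre
    rcases List.prefix_or_prefix_of_prefix hpre (List.prefix_append (e.1.drop p) u) with h | h
    · exact (tb_noov e he e' he' p hp hpos).2 h
    · exact (tb_noov e he e' he' p hp hpos).1 h

-- folding entries ≠ e over e.1 ++ u keeps the e.1 prefix intact
theorem fold_prepend_key (e : List Char × List Char) (he : e ∈ bTable) :
    ∀ ts, (∀ e' ∈ ts, e' ∈ bTable ∧ e' ≠ e) → ∀ u,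
      foldlRep ts (e.1 ++ u) = e.1 ++ foldlRep ts u := by
  intro ts
  induction ts with
  | nil => intro _ u; rfl
  | cons e' rest ih =>
    intro hmem u
    have h1 : rep1 e'.1 e'.2 (e.1 ++ u) = e.1 ++ rep1 e'.1 e'.2 u :=
      rep1_append e'.1 e'.2 e.1 u
        (key_no_match e e' he (hmem e' (by simp)).1 (hmem e' (by simp)).2 u)
    simp only [foldlRep, List.foldl_cons] at *
    rw [h1]
    exact ih (fun x hx => hmem x (by simp [hx])) (rep1 e'.1 e'.2 u)

-- folding table entries over e.2 ++ w keeps the replacement prefix intact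
theorem fold_prepend_val (e : List Char × List Char) (he : e ∈ bTable) :
    ∀ ts, (∀ e' ∈ ts, e' ∈ bTable) → ∀ w,
      foldlRep ts (e.2 ++ w) = e.2 ++ foldlRep ts w := by
  intro ts
  induction ts with
  | nil => intro _ w; rfl
  | cons e' rest ih =>
    intro hmem w
    have he' : e' ∈ bTable := hmem e' (by simp)
    have h1 : rep1 e'.1 e'.2 (e.2 ++ w) = e.2 ++ rep1 e'.1 e'.2 w := by
      apply rep1_append
      intro p hp
      rw [List.drop_append, Nat.sub_eq_zero_of_le (Nat.le_of_lt hp), List.drop_zero]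
      apply no_prefix_fresh _ _ _ (tb_ne e' he').1
      · intro hx
        rw [List.drop_eq_nil_iff] at hx
        omega
      · intro c hc
        exact tb_fresh e' he' e he c (List.drop_subset p e.2 hc)
    simp only [foldlRep, List.foldl_cons] at *
    rw [h1]
    exact ih (fun x hx => hmem x (by simp [hx])) (rep1 e'.1 e'.2 w)

-- the match case: if entry e's key heads the string, A's full fold emits e.2 and recurses
theorem fold_match (pre post : List (List Char × List Char)) (e : List Char × List Char)
    (hdec : bTable = pre ++ e :: post) (u : List Char) :
    foldlRep bTable (e.1 ++ u) = e.2 ++ foldlRep bTable u := by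
  have he : e ∈ bTable := by rw [hdec]; simp
  have hnd := tb_nodup
  rw [hdec] at hnd
  have hdisj := (List.nodup_append.mp hnd).2.2
  have hpre_mem : ∀ e' ∈ pre, e' ∈ bTable ∧ e' ≠ e := by
    intro e' he'
    refine ⟨by rw [hdec]; simp [he'], fun hx => ?_⟩
    exact hdisj e' he' e (by simp) hx
  have hpost_mem : ∀ e' ∈ post, e' ∈ bTable := by
    intro e' he'
    rw [hdec]; simp [he']
  have step : ∀ s, foldlRep bTable s = foldlRep post (rep1 e.1 e.2 (foldlRep pre s)) := by
    intro s
    rw [hdec]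
    simp [foldlRep, List.foldl_append]
  rw [step, step u]
  rw [fold_prepend_key e he pre hpre_mem u]
  rw [rep1_match e.1 e.2 _ (tb_ne e he).1 (List.prefix_append e.1 _), List.drop_left]
  exact fold_prepend_val e he post hpost_mem _

-- the no-match case: the head character passes through every replace pass
theorem fold_nomatch : ∀ ts, (∀ e ∈ ts, e ∈ bTable) → ∀ (c : Char) (t : List Char),
    (∀ e ∈ bTable, ¬ e.1 <+: c :: t) → foldlRep ts (c :: t) = c :: foldlRep ts t := by
  intro ts
  induction ts with
  | nil => intro _ c t _; rfl
  | cons e rest ih =>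
    intro hmem c t hnm
    have he : e ∈ bTable := hmem e (by simp)
    have h1 : rep1 e.1 e.2 (c :: t) = c :: rep1 e.1 e.2 t :=
      rep1_cons_neg e.1 e.2 c t (hnm e he)
    simp only [foldlRep, List.foldl_cons] at *
    rw [h1]
    apply ih (fun x hx => hmem x (by simp [hx])) c (rep1 e.1 e.2 t)
    intro e' he' hpre
    cases hk : e'.1 with
    | nil => exact absurd hk (tb_ne e' he').1
    | cons d ds =>
      rw [hk, List.cons_prefix_cons] at hpre
      have hds : ds <+: t := by
        apply prefix_rep1 e.1 e.2 t ds (tb_ne e he).1 (tb_ne e he).2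
        · intro x hx hxm
          exact tb_fresh e' he' e he x hx (by rw [hk]; simp [hxm])
        · exact hpre.2
      apply hnm e' he'
      rw [hk, hpre.1, List.cons_prefix_cons]
      exact ⟨rfl, hds⟩

-- tryMatch characterisations
theorem tryMatch_none : ∀ (ts : List (List Char × List Char)) (s : List Char),
    tryMatch ts s = none → ∀ e ∈ ts, ¬ e.1 <+: s := by
  intro ts
  induction ts with
  | nil => intro s _ e he; simp at he
  | cons e' rest ih =>
    intro s h e he
    obtain ⟨k, v⟩ := e'
    simp only [tryMatch] at h
    split at h
    · exact absurd h (by simp)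
    · rename_i hnp
      rcases List.mem_cons.mp he with rfl | hmem
      · intro hx; exact hnp (List.isPrefixOf_iff_prefix.mpr hx)
      · exact ih s h e hmem

theorem tryMatch_some : ∀ (ts : List (List Char × List Char)) (s u v : List Char),
    tryMatch ts s = some (u, v) →
    ∃ pre k post, ts = pre ++ (k, v) :: post ∧ k <+: s ∧ u = s.drop k.length := by
  intro ts
  induction ts with
  | nil => intro s u v h; simp [tryMatch] at h
  | cons e' rest ih =>
    intro s u v h
    obtain ⟨k, v'⟩ := e'
    simp only [tryMatch] at h
    split at h
    · rename_i hp
      simp only [Option.some.injEq, Prod.mk.injEq] at h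
      exact ⟨[], k, rest, by simp [h.2], List.isPrefixOf_iff_prefix.mp hp, h.1.symm⟩
    · obtain ⟨pre, k0, post, hdec, hk, hu⟩ := ih s u v h
      exact ⟨(k, v') :: pre, k0, post, by simp [hdec], hk, hu⟩

theorem scanGo_nil : scanGo [] = [] := by
  rw [scanGo.eq_def]

theorem scanGo_none (c : Char) (t : List Char) (h : tryMatch bTable (c :: t) = none) :
    scanGo (c :: t) = c :: scanGo t := by
  conv_lhs => rw [scanGo.eq_def]
  dsimp only
  split
  · rename_i u v heq; rw [h] at heq; exact absurd heq (by simp)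
  · rfl

theorem scanGo_some (c : Char) (t u v : List Char) (h : tryMatch bTable (c :: t) = some (u, v)) :
    scanGo (c :: t) = v ++ scanGo u := by
  conv_lhs => rw [scanGo.eq_def]
  dsimp only
  split
  · rename_i u' v' heq
    rw [h] at heq
    injection heq with h'
    injection h' with ha hb
    rw [ha, hb]
  · rename_i heq; rw [h] at heq; exact absurd heq (by simp)

-- main equivalence on char lists
theorem main_eq : ∀ s : List Char, foldlRep bTable s = scanGo s := by
  intro s
  induction hn : s.length using Nat.strong_induction_on generalizing s with
  | _ n ih =>
    match s, hn with
    | [], _ => rw [foldlRep_nil, scanGo_nil]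
    | c :: t, hn =>
      cases hm : tryMatch bTable (c :: t) with
      | none =>
        rw [scanGo_none c t hm]
        rw [fold_nomatch bTable (fun e he => he) c t (tryMatch_none bTable (c :: t) hm)]
        subst hn
        rw [ih t.length (by simp) t rfl]
      | some uv =>
        obtain ⟨u, v⟩ := uv
        rw [scanGo_some c t u v hm]
        obtain ⟨pre, k, post, hdec, hk, hu⟩ := tryMatch_some bTable (c :: t) u v hm
        obtain ⟨w, hw⟩ := hk
        have hkne : k ≠ [] := (tb_ne (k, v) (by rw [hdec]; simp)).1
        have huw : u = w := by rw [hu, ← hw, List.drop_left]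
        rw [← hw, fold_match pre post (k, v) hdec w]
        subst hn huw
        rw [ih u.length ?_ u rfl]
        · rw [← hw]
          simp only [List.length_append]
          have : 1 ≤ k.length := List.length_pos_of_ne_nil hkne
          omega

-- ===== VERDICT (by name: the statement is the Claim_ definition above) =====
theorem bibtex_unescape_spec : Claim_equal_bibtex_unescape := by
  intro contents _
  unfold Spec_bibtex_unescape bibtex_unescape bibtex_unescape_alt
  rw [← String.toList_inj, String.toList_ofList]
  rw [A_toList aTable contents (by decide)]
  rw [show (aTable.map fun kv => (kv.1.toList, kv.2.toList)) = bTable from rfl]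
  exact main_eq contents.toList
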